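-- pv_equiv track=rewrite | github.com/j7johnny/who-is-rat | library/services/watermark.py | build_local_offsets
-- ===== SOURCE A (Python) =====
-- def build_local_offsets(radius: int = 1) -> list[tuple[int, int]]:
--     offsets = [(0, 0)]
--     for current_radius in range(1, radius + 1):
--         for dy in range(-current_radius, current_radius + 1):
--             for dx in range(-current_radius, current_radius + 1):
--                 if dx == 0 and dy == 0:
--                     continue
--                 if max(abs(dx), abs(dy)) != current_radius:
--                     continue
--                 offsets.append((dx, dy))
--     return offsets
-- ===== SOURCE B (Python) =====
-- def build_local_offsets(radius: int = 1) -> list[tuple[int, int]]: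
--     # Enumerate only the perimeter of each Chebyshev ring, in the same
--     # dy-outer / dx-inner order A produces (O(radius^2) instead of O(radius^3)).
--     offsets = [(0, 0)]
--     for r in range(1, radius + 1):
--         offsets += [(dx, -r) for dx in range(-r, r + 1)]
--         for dy in range(-r + 1, r):
--             offsets += [(-r, dy), (r, dy)]
--         offsets += [(dx, r) for dx in range(-r, r + 1)]
--     return offsets
-- ===== Notes on version B (the rewrite author's own statement) =====
-- stated objective: faster
-- what changed: Instead of scanning the full (2r+1)x(2r+1) square of every ring and filtering for Chebyshev distance r, B enumerates only the ring's perimeter cells directly (top row, two side columns, bottom row) in the same order.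
import Mathlib
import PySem

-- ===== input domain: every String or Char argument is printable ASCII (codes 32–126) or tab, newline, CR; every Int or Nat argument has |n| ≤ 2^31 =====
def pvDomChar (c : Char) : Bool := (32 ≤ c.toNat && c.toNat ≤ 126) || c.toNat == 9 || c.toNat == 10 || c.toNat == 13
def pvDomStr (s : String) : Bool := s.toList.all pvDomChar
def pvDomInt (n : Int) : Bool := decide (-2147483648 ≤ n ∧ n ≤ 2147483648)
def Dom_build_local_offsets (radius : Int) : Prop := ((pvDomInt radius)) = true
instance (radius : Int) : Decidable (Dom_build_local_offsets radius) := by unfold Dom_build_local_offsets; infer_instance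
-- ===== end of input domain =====

-- B enumerates only the perimeter cells of each Chebyshev ring instead of filtering the full square.

-- ===== PORT A =====
def build_local_offsets (radius : Int) : List (Int × Int) :=
  (PySem.List.pyRange 1 (radius + 1)).foldl (fun offsets cr =>
    (PySem.List.pyRange (-cr) (cr + 1)).foldl (fun offsets dy =>
      (PySem.List.pyRange (-cr) (cr + 1)).foldl (fun offsets dx =>
        if dx = 0 ∧ dy = 0 then offsets
        else if max |dx| |dy| ≠ cr then offsets
        else offsets ++ [(dx, dy)]) offsets) offsets) [(0, 0)]

-- ===== PORT B =====
def build_local_offsets_alt (radius : Int) : List (Int × Int) :=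
  (PySem.List.pyRange 1 (radius + 1)).foldl (fun offsets r =>
    ((offsets ++ (PySem.List.pyRange (-r) (r + 1)).map (fun dx => (dx, -r)))
      |> fun offsets =>
        (PySem.List.pyRange (-r + 1) r).foldl
          (fun offsets dy => offsets ++ [(-r, dy), (r, dy)]) offsets)
    ++ (PySem.List.pyRange (-r) (r + 1)).map (fun dx => (dx, r))) [(0, 0)]

-- ===== PRECONDITION & SPEC =====
def Spec_build_local_offsets (radius : Int) (out : List (Int × Int)) : Prop := out = build_local_offsets_alt radius
instance (radius : Int) (out : List (Int × Int)) : Decidable (Spec_build_local_offsets radius out) := by unfold Spec_build_local_offsets; infer_instance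

-- ===== CLAIM (what is proved, stated in full; the proofs are below) =====
def Claim_equal_build_local_offsets : Prop := ∀ (radius : Int), Dom_build_local_offsets radius → Spec_build_local_offsets radius (build_local_offsets radius)

-- ===== LEMMAS AND PROOFS =====

-- A's inner dx-loop is an append-if fold: it appends the filtered row.
theorem innerA_eq (cr dy : Int) (acc : List (Int × Int)) :
    (PySem.List.pyRange (-cr) (cr + 1)).foldl (fun offsets dx =>
        if dx = 0 ∧ dy = 0 then offsets
        else if max |dx| |dy| ≠ cr then offsets
        else offsets ++ [(dx, dy)]) acc
      = acc ++ ((PySem.List.pyRange (-cr) (cr + 1)).filter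
          (fun dx => decide (¬(dx = 0 ∧ dy = 0) ∧ max |dx| |dy| = cr))).map (fun dx => (dx, dy)) := by
  rw [← PySem.List.foldl_append_if (fun dx => decide (¬(dx = 0 ∧ dy = 0) ∧ max |dx| |dy| = cr))
        (fun dx => (dx, dy)) (PySem.List.pyRange (-cr) (cr + 1)) acc]
  apply PySem.List.foldl_congr_mem
  intro a x _
  by_cases h1 : x = 0 ∧ dy = 0 <;> by_cases h2 : max |x| |dy| = cr <;> simp [h1, h2]

-- the filtered row when |dy| = cr (top/bottom row): everything survives
theorem row_full (cr dy : Int) (h1 : 1 ≤ cr) (hdy : |dy| = cr) :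
    ((PySem.List.pyRange (-cr) (cr + 1)).filter
        (fun dx => decide (¬(dx = 0 ∧ dy = 0) ∧ max |dx| |dy| = cr)))
      = PySem.List.pyRange (-cr) (cr + 1) := by
  apply List.filter_eq_self.mpr
  intro x hx
  rw [PySem.List.mem_pyRange_one] at hx
  simp only [decide_eq_true_eq]
  rw [hdy]
  rw [Int.abs_eq_natAbs] at hdy ⊢
  constructor
  · rintro ⟨-, h0⟩; omega
  · omega

-- the filtered row when |dy| < cr (middle rows): only the two side cells survive
theorem row_sides (cr dy : Int) (h1 : 1 ≤ cr) (hdy : |dy| < cr) :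
    ((PySem.List.pyRange (-cr) (cr + 1)).filter
        (fun dx => decide (¬(dx = 0 ∧ dy = 0) ∧ max |dx| |dy| = cr)))
      = [-cr, cr] := by
  rw [PySem.List.pyRange_one_cons (by omega),
      show (cr : Int) + 1 = cr + 1 from rfl]
  rw [PySem.List.pyRange_one_succ_right (by omega)]
  rw [List.filter_cons, List.filter_append]
  have hmid : (PySem.List.pyRange (-cr + 1) cr).filter
      (fun dx => decide (¬(dx = 0 ∧ dy = 0) ∧ max |dx| |dy| = cr)) = [] := by
    apply List.filter_eq_nil_iff.mpr
    intro x hx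
    rw [PySem.List.mem_pyRange_one] at hx
    simp only [decide_eq_true_eq]
    rw [Int.abs_eq_natAbs, Int.abs_eq_natAbs] at *
    omega
  rw [hmid]
  have hA : |(-cr : Int)| = cr := by rw [abs_neg]; exact abs_of_nonneg (by omega)
  have hB : |(cr : Int)| = cr := abs_of_nonneg (by omega)
  have hcne : (-cr : Int) ≠ 0 := by omega
  have hcne2 : (cr : Int) ≠ 0 := by omega
  simp only [List.filter_cons, List.filter_nil, hA, hB]
  rw [Int.abs_eq_natAbs] at hdy
  have hmax : max cr |dy| = cr := max_eq_left (by rw [Int.abs_eq_natAbs]; omega)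
  simp only [decide_eq_true_eq]
  rw [if_pos ⟨by rintro ⟨h, -⟩; omega, hmax⟩, if_pos ⟨by rintro ⟨h, -⟩; omega, hmax⟩]
  rfl

-- one ring of A equals one ring of B
theorem ring_eq (cr : Int) (h1 : 1 ≤ cr) (acc : List (Int × Int)) :
    (PySem.List.pyRange (-cr) (cr + 1)).foldl (fun offsets dy =>
      (PySem.List.pyRange (-cr) (cr + 1)).foldl (fun offsets dx =>
        if dx = 0 ∧ dy = 0 then offsets
        else if max |dx| |dy| ≠ cr then offsets
        else offsets ++ [(dx, dy)]) offsets) acc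
    = ((acc ++ (PySem.List.pyRange (-cr) (cr + 1)).map (fun dx => (dx, -cr)))
        |> fun offsets =>
          (PySem.List.pyRange (-cr + 1) cr).foldl
            (fun offsets dy => offsets ++ [(-cr, dy), (cr, dy)]) offsets)
      ++ (PySem.List.pyRange (-cr) (cr + 1)).map (fun dx => (dx, cr)) := by
  have step : ∀ (a : List (Int × Int)) (dy : Int),
      (PySem.List.pyRange (-cr) (cr + 1)).foldl (fun offsets dx =>
        if dx = 0 ∧ dy = 0 then offsets
        else if max |dx| |dy| ≠ cr then offsets
        else offsets ++ [(dx, dy)]) a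
      = a ++ ((PySem.List.pyRange (-cr) (cr + 1)).filter
          (fun dx => decide (¬(dx = 0 ∧ dy = 0) ∧ max |dx| |dy| = cr))).map (fun dx => (dx, dy)) :=
    fun a dy => innerA_eq cr dy a
  rw [PySem.List.foldl_congr_mem _ _ _ acc (fun a dy _ => step a dy)]
  rw [PySem.List.foldl_append_eq_flatMap]
  -- split A's dy-range into bottom row, middle rows, top row (g kept abstract so the
  -- dx-ranges inside the rows are untouched)
  have hsplit : ∀ {β : Type} (g : Int → List β),
      (PySem.List.pyRange (-cr) (cr + 1)).flatMap g
        = g (-cr) ++ ((PySem.List.pyRange (-cr + 1) cr).flatMap g ++ g cr) := by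
    intro β g
    rw [PySem.List.pyRange_one_cons (a := -cr) (b := cr + 1) (by omega),
        PySem.List.pyRange_one_succ_right (a := -cr + 1) (b := cr) (by omega)]
    simp
  rw [hsplit]
  have hbot : |(-cr : Int)| = cr := by rw [abs_neg]; exact abs_of_nonneg (by omega)
  have htop : |(cr : Int)| = cr := abs_of_nonneg (by omega)
  rw [row_full cr (-cr) h1 hbot, row_full cr cr h1 htop]
  have hmid : (PySem.List.pyRange (-cr + 1) cr).flatMap
      (fun dy => ((PySem.List.pyRange (-cr) (cr + 1)).filter
          (fun dx => decide (¬(dx = 0 ∧ dy = 0) ∧ max |dx| |dy| = cr))).map (fun dx => (dx, dy)))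
      = (PySem.List.pyRange (-cr + 1) cr).flatMap (fun dy => [(-cr, dy), (cr, dy)]) := by
    apply List.flatMap_congr
    intro dy hdy
    rw [PySem.List.mem_pyRange_one] at hdy
    rw [row_sides cr dy h1 (by rw [Int.abs_eq_natAbs]; omega)]
    rfl
  rw [hmid]
  simp only [PySem.List.foldl_append_eq_flatMap, List.append_assoc]

-- ===== VERDICT (by name: the statement is the Claim_ definition above) =====
theorem build_local_offsets_spec : Claim_equal_build_local_offsets := by
  intro radius _
  unfold Spec_build_local_offsets build_local_offsets build_local_offsets_alt
  apply PySem.List.foldl_congr_mem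
  intro acc cr hcr
  rw [PySem.List.mem_pyRange_one] at hcr
  exact ring_eq cr hcr.1 acc
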